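-- pv_equiv track=rewrite | github.com/Elisaelias02/sat_hacker_tool | modules/sat_data.py | _infer_satellite_info
-- ===== SOURCE A (Python) =====
-- from typing import Dict, List, Optional, Tuple
--
-- def _infer_satellite_info(satellite_name: str) -> Dict:
--     """Infiere información del satélite basado en su nombre."""
--     name_upper = satellite_name.upper()
--     info = {
--         'inferred_country': 'UNKNOWN',
--         'inferred_type': 'UNKNOWN',
--         'inferred_purpose': 'UNKNOWN'
--     }
--
--     # Inferir país basado en patrones de nombres
--     if any(pattern in name_upper for pattern in ['ISS', 'DRAGON', 'CYGNUS']):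
--         info['inferred_country'] = 'INTERNATIONAL'
--     elif any(pattern in name_upper for pattern in ['STARLINK', 'GPS', 'NOAA', 'GOES']):
--         info['inferred_country'] = 'US'
--     elif any(pattern in name_upper for pattern in ['COSMOS', 'GLONASS']):
--         info['inferred_country'] = 'RU'
--     elif 'BEIDOU' in name_upper:
--         info['inferred_country'] = 'CN'
--     elif 'GALILEO' in name_upper:
--         info['inferred_country'] = 'EU'
--
--     # Inferir tipo/propósito
--     if any(pattern in name_upper for pattern in ['STARLINK', 'ONEWEB', 'IRIDIUM']):
--         info['inferred_type'] = 'COMMUNICATION'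
--         info['inferred_purpose'] = 'Internet/Communications constellation'
--     elif any(pattern in name_upper for pattern in ['GPS', 'GLONASS', 'GALILEO', 'BEIDOU']):
--         info['inferred_type'] = 'NAVIGATION'
--         info['inferred_purpose'] = 'Global Navigation Satellite System'
--     elif any(pattern in name_upper for pattern in ['NOAA', 'GOES', 'METOP']):
--         info['inferred_type'] = 'WEATHER'
--         info['inferred_purpose'] = 'Weather monitoring and forecasting'
--     elif any(pattern in name_upper for pattern in ['LANDSAT', 'SENTINEL', 'WORLDVIEW']):
--         info['inferred_type'] = 'EARTH_OBSERVATION'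
--         info['inferred_purpose'] = 'Earth observation and remote sensing'
--     elif 'ISS' in name_upper:
--         info['inferred_type'] = 'SPACE_STATION'
--         info['inferred_purpose'] = 'International Space Station'
--     elif 'COSMOS' in name_upper:
--         info['inferred_type'] = 'MILITARY'
--         info['inferred_purpose'] = 'Military/Intelligence satellite'
--
--     return info
-- ===== SOURCE B (Python) =====
-- # B: one matched-pattern pass, then minimum-priority selection (no group-by-group first-match chain).
-- COUNTRY_PRI = {'ISS': 0, 'DRAGON': 0, 'CYGNUS': 0,
--                'STARLINK': 1, 'GPS': 1, 'NOAA': 1, 'GOES': 1,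
--                'COSMOS': 2, 'GLONASS': 2, 'BEIDOU': 3, 'GALILEO': 4}
-- COUNTRY_VAL = ['INTERNATIONAL', 'US', 'RU', 'CN', 'EU']
--
-- TYPE_PRI = {'STARLINK': 0, 'ONEWEB': 0, 'IRIDIUM': 0,
--             'GPS': 1, 'GLONASS': 1, 'GALILEO': 1, 'BEIDOU': 1,
--             'NOAA': 2, 'GOES': 2, 'METOP': 2,
--             'LANDSAT': 3, 'SENTINEL': 3, 'WORLDVIEW': 3,
--             'ISS': 4, 'COSMOS': 5}
-- TYPE_VAL = [('COMMUNICATION', 'Internet/Communications constellation'),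
--             ('NAVIGATION', 'Global Navigation Satellite System'),
--             ('WEATHER', 'Weather monitoring and forecasting'),
--             ('EARTH_OBSERVATION', 'Earth observation and remote sensing'),
--             ('SPACE_STATION', 'International Space Station'),
--             ('MILITARY', 'Military/Intelligence satellite')]
--
--
-- def _infer_satellite_info(satellite_name: str) -> dict:
--     u = satellite_name.upper()
--     c_hits = [pri for pat, pri in COUNTRY_PRI.items() if pat in u]
--     t_hits = [pri for pat, pri in TYPE_PRI.items() if pat in u]
--     country = COUNTRY_VAL[min(c_hits)] if c_hits else 'UNKNOWN'
--     typ, purpose = TYPE_VAL[min(t_hits)] if t_hits else ('UNKNOWN', 'UNKNOWN')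
--     return {'inferred_country': country,
--             'inferred_type': typ,
--             'inferred_purpose': purpose}
-- ===== Notes on version B (the rewrite author's own statement) =====
-- stated objective: alternative
-- what changed: Instead of two ordered if/elif first-match chains, B maps each pattern to a numeric priority, collects the priorities of ALL patterns found in the upper-cased name in one pass, and selects country/type by taking the minimum priority and indexing a value table; first-match precedence is recovered because priorities follow the original rule order.
import Mathlib
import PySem

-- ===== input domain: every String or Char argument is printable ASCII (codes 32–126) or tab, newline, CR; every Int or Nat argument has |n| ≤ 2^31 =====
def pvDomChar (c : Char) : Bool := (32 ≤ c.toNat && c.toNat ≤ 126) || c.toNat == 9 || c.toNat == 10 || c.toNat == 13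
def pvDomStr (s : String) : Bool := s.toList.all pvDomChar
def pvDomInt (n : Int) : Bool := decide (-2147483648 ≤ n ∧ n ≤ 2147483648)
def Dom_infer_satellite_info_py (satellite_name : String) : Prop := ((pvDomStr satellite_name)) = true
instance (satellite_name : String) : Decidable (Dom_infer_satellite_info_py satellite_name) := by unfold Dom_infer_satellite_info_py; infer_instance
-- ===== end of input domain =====

-- B computes the set of matched patterns in one pass and selects country/type by minimum priority, instead of A's ordered if/elif chains (alternative decomposition, same cost).


-- ===== PORT A =====
-- literal port of A: build the defaults dict, then two if/elif chains overwrite its keys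
def infer_satellite_info_py (satellite_name : String) : List (String × String) :=
  let name_upper := PySem.Str.upper satellite_name
  let info : PySem.Dict String String :=
    PySem.Dict.ofList [("inferred_country", "UNKNOWN"), ("inferred_type", "UNKNOWN"), ("inferred_purpose", "UNKNOWN")]
  let info :=
    if ["ISS", "DRAGON", "CYGNUS"].any (fun p => PySem.Str.isIn p name_upper) then
      info.insert "inferred_country" "INTERNATIONAL"
    else if ["STARLINK", "GPS", "NOAA", "GOES"].any (fun p => PySem.Str.isIn p name_upper) then
      info.insert "inferred_country" "US"
    else if ["COSMOS", "GLONASS"].any (fun p => PySem.Str.isIn p name_upper) then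
      info.insert "inferred_country" "RU"
    else if PySem.Str.isIn "BEIDOU" name_upper then
      info.insert "inferred_country" "CN"
    else if PySem.Str.isIn "GALILEO" name_upper then
      info.insert "inferred_country" "EU"
    else info
  let info :=
    if ["STARLINK", "ONEWEB", "IRIDIUM"].any (fun p => PySem.Str.isIn p name_upper) then
      (info.insert "inferred_type" "COMMUNICATION").insert "inferred_purpose" "Internet/Communications constellation"
    else if ["GPS", "GLONASS", "GALILEO", "BEIDOU"].any (fun p => PySem.Str.isIn p name_upper) then
      (info.insert "inferred_type" "NAVIGATION").insert "inferred_purpose" "Global Navigation Satellite System"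
    else if ["NOAA", "GOES", "METOP"].any (fun p => PySem.Str.isIn p name_upper) then
      (info.insert "inferred_type" "WEATHER").insert "inferred_purpose" "Weather monitoring and forecasting"
    else if ["LANDSAT", "SENTINEL", "WORLDVIEW"].any (fun p => PySem.Str.isIn p name_upper) then
      (info.insert "inferred_type" "EARTH_OBSERVATION").insert "inferred_purpose" "Earth observation and remote sensing"
    else if PySem.Str.isIn "ISS" name_upper then
      (info.insert "inferred_type" "SPACE_STATION").insert "inferred_purpose" "International Space Station"
    else if PySem.Str.isIn "COSMOS" name_upper then
      (info.insert "inferred_type" "MILITARY").insert "inferred_purpose" "Military/Intelligence satellite"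
    else info
  info.items

-- ===== PORT B =====
-- B: pattern -> priority tables; collect the priorities of all matched patterns, take the minimum, index a value table
def pvCountryPri : List (String × Nat) :=
  [("ISS", 0), ("DRAGON", 0), ("CYGNUS", 0),
   ("STARLINK", 1), ("GPS", 1), ("NOAA", 1), ("GOES", 1),
   ("COSMOS", 2), ("GLONASS", 2), ("BEIDOU", 3), ("GALILEO", 4)]

def pvCountryVal : List String := ["INTERNATIONAL", "US", "RU", "CN", "EU"]

def pvTypePri : List (String × Nat) :=
  [("STARLINK", 0), ("ONEWEB", 0), ("IRIDIUM", 0),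
   ("GPS", 1), ("GLONASS", 1), ("GALILEO", 1), ("BEIDOU", 1),
   ("NOAA", 2), ("GOES", 2), ("METOP", 2),
   ("LANDSAT", 3), ("SENTINEL", 3), ("WORLDVIEW", 3),
   ("ISS", 4), ("COSMOS", 5)]

def pvTypeVal : List (String × String) :=
  [("COMMUNICATION", "Internet/Communications constellation"),
   ("NAVIGATION", "Global Navigation Satellite System"),
   ("WEATHER", "Weather monitoring and forecasting"),
   ("EARTH_OBSERVATION", "Earth observation and remote sensing"),
   ("SPACE_STATION", "International Space Station"),
   ("MILITARY", "Military/Intelligence satellite")]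

def infer_satellite_info_py_alt (satellite_name : String) : List (String × String) :=
  let u := PySem.Str.upper satellite_name
  let cHits := (pvCountryPri.filter (fun pp => PySem.Str.isIn pp.1 u)).map Prod.snd
  let tHits := (pvTypePri.filter (fun pp => PySem.Str.isIn pp.1 u)).map Prod.snd
  -- Python `min(list)` over a nonempty list of ints = fold of min over the tail
  let country := match cHits with
    | [] => "UNKNOWN"
    | h :: rest => pvCountryVal.getD (rest.foldl Nat.min h) "UNKNOWN"
  let tp := match tHits with
    | [] => ("UNKNOWN", "UNKNOWN")
    | h :: rest => pvTypeVal.getD (rest.foldl Nat.min h) ("UNKNOWN", "UNKNOWN")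
  [("inferred_country", country), ("inferred_type", tp.1), ("inferred_purpose", tp.2)]

-- ===== PRECONDITION & SPEC =====
def Spec_infer_satellite_info_py (satellite_name : String) (out : List (String × String)) : Prop := out = infer_satellite_info_py_alt satellite_name
instance (satellite_name : String) (out : List (String × String)) : Decidable (Spec_infer_satellite_info_py satellite_name out) := by unfold Spec_infer_satellite_info_py; infer_instance

-- ===== CLAIM =====
def Claim_equal_infer_satellite_info_py : Prop := ∀ (satellite_name : String), Dom_infer_satellite_info_py satellite_name → Spec_infer_satellite_info_py satellite_name (infer_satellite_info_py satellite_name)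

-- ===== LEMMAS AND PROOFS =====

-- fold of Nat.min over a list whose elements are all ≥ a is a
theorem pv_foldl_min_eq (l : List Nat) (a : Nat) (h : ∀ x ∈ l, a ≤ x) : l.foldl Nat.min a = a := by
  induction l generalizing a with
  | nil => rfl
  | cons x xs ih =>
      simp only [List.foldl_cons]
      rw [show a.min x = a from Nat.min_eq_left (h x (by simp))]
      exact ih a (fun y hy => h y (by simp [hy]))

-- head of a filter unfolds one element at a time (keeps the term linear in the table length)
theorem pv_head?_filter_cons {α : Type} (p : α → Bool) (x : α) (l : List α) :
    ((x :: l).filter p).head? = if p x then some x else (l.filter p).head? := by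
  simp only [List.filter_cons]; split <;> simp

-- on a priority-sorted hit list, Python's min is the first hit
theorem pv_sel_eq_head {α : Type} (dflt : α) (f : Nat → α) (hits : List Nat)
    (hs : hits.Pairwise (· ≤ ·)) :
    (match hits with
     | [] => dflt
     | h :: rest => f (rest.foldl Nat.min h))
    = (match hits.head? with
       | none => dflt
       | some h => f h) := by
  cases hits with
  | nil => rfl
  | cons h rest =>
      simp only [List.head?_cons]
      rw [pv_foldl_min_eq rest h (List.pairwise_cons.mp hs).1]

-- B's min-priority selection over the country table = the first-match if/elif expression
set_option maxHeartbeats 2000000 in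
theorem pv_country_sel (u : String) :
    (match ((pvCountryPri.filter (fun pp => PySem.Str.isIn pp.1 u)).map Prod.snd) with
      | [] => "UNKNOWN"
      | h :: rest => pvCountryVal.getD (rest.foldl Nat.min h) "UNKNOWN")
    = (if PySem.Str.isIn "ISS" u || (PySem.Str.isIn "DRAGON" u || PySem.Str.isIn "CYGNUS" u) then "INTERNATIONAL"
       else if PySem.Str.isIn "STARLINK" u || (PySem.Str.isIn "GPS" u || (PySem.Str.isIn "NOAA" u || PySem.Str.isIn "GOES" u)) then "US"
       else if PySem.Str.isIn "COSMOS" u || PySem.Str.isIn "GLONASS" u then "RU"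
       else if PySem.Str.isIn "BEIDOU" u then "CN"
       else if PySem.Str.isIn "GALILEO" u then "EU"
       else "UNKNOWN") := by
  have hp : (((pvCountryPri.filter (fun pp => PySem.Str.isIn pp.1 u)).map Prod.snd)).Pairwise (· ≤ ·) := by
    refine List.pairwise_map.mpr (List.Pairwise.filter _ ?_)
    have : pvCountryPri.Pairwise (fun a b => a.2 ≤ b.2) := by decide
    exact this
  rw [pv_sel_eq_head "UNKNOWN" (fun n => pvCountryVal.getD n "UNKNOWN") _ hp]
  rw [List.head?_map]
  simp only [pvCountryPri, pv_head?_filter_cons, List.filter_nil]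
  clear hp
  by_cases h1 : PySem.Str.isIn "ISS" u = true
  · simp only [h1, Bool.true_or, reduceIte]
    rfl
  rw [Bool.not_eq_true] at h1
  simp only [h1, Bool.false_or]
  by_cases h2 : PySem.Str.isIn "DRAGON" u = true
  · simp only [h2, Bool.true_or, reduceIte]
    rfl
  rw [Bool.not_eq_true] at h2
  simp only [h2, Bool.false_or]
  by_cases h3 : PySem.Str.isIn "CYGNUS" u = true
  · simp only [h3, reduceIte]
    rfl
  rw [Bool.not_eq_true] at h3
  simp only [h3]
  by_cases h4 : PySem.Str.isIn "STARLINK" u = true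
  · simp only [h4, Bool.true_or, reduceIte]
    rfl
  rw [Bool.not_eq_true] at h4
  simp only [h4, Bool.false_or]
  by_cases h5 : PySem.Str.isIn "GPS" u = true
  · simp only [h5, Bool.true_or, reduceIte]
    rfl
  rw [Bool.not_eq_true] at h5
  simp only [h5, Bool.false_or]
  by_cases h6 : PySem.Str.isIn "NOAA" u = true
  · simp only [h6, Bool.true_or, reduceIte]
    rfl
  rw [Bool.not_eq_true] at h6
  simp only [h6, Bool.false_or]
  by_cases h7 : PySem.Str.isIn "GOES" u = true
  · simp only [h7, reduceIte]
    rfl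
  rw [Bool.not_eq_true] at h7
  simp only [h7]
  by_cases h8 : PySem.Str.isIn "COSMOS" u = true
  · simp only [h8, Bool.true_or, reduceIte]
    rfl
  rw [Bool.not_eq_true] at h8
  simp only [h8, Bool.false_or]
  by_cases h9 : PySem.Str.isIn "GLONASS" u = true
  · simp only [h9, reduceIte]
    rfl
  rw [Bool.not_eq_true] at h9
  simp only [h9]
  by_cases h10 : PySem.Str.isIn "BEIDOU" u = true
  · simp only [h10, reduceIte]
    rfl
  rw [Bool.not_eq_true] at h10
  simp only [h10]
  by_cases h11 : PySem.Str.isIn "GALILEO" u = true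
  · simp only [h11, reduceIte]
    rfl
  rw [Bool.not_eq_true] at h11
  simp only [h11]
  rfl

-- B's min-priority selection over the type table = the first-match if/elif expression
set_option maxHeartbeats 2000000 in
theorem pv_type_sel (u : String) :
    (match ((pvTypePri.filter (fun pp => PySem.Str.isIn pp.1 u)).map Prod.snd) with
      | [] => ("UNKNOWN", "UNKNOWN")
      | h :: rest => pvTypeVal.getD (rest.foldl Nat.min h) ("UNKNOWN", "UNKNOWN"))
    = (if PySem.Str.isIn "STARLINK" u || (PySem.Str.isIn "ONEWEB" u || PySem.Str.isIn "IRIDIUM" u) then ("COMMUNICATION", "Internet/Communications constellation")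
       else if PySem.Str.isIn "GPS" u || (PySem.Str.isIn "GLONASS" u || (PySem.Str.isIn "GALILEO" u || PySem.Str.isIn "BEIDOU" u)) then ("NAVIGATION", "Global Navigation Satellite System")
       else if PySem.Str.isIn "NOAA" u || (PySem.Str.isIn "GOES" u || PySem.Str.isIn "METOP" u) then ("WEATHER", "Weather monitoring and forecasting")
       else if PySem.Str.isIn "LANDSAT" u || (PySem.Str.isIn "SENTINEL" u || PySem.Str.isIn "WORLDVIEW" u) then ("EARTH_OBSERVATION", "Earth observation and remote sensing")
       else if PySem.Str.isIn "ISS" u then ("SPACE_STATION", "International Space Station")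
       else if PySem.Str.isIn "COSMOS" u then ("MILITARY", "Military/Intelligence satellite")
       else ("UNKNOWN", "UNKNOWN")) := by
  have hp : (((pvTypePri.filter (fun pp => PySem.Str.isIn pp.1 u)).map Prod.snd)).Pairwise (· ≤ ·) := by
    refine List.pairwise_map.mpr (List.Pairwise.filter _ ?_)
    have : pvTypePri.Pairwise (fun a b => a.2 ≤ b.2) := by decide
    exact this
  rw [pv_sel_eq_head ("UNKNOWN", "UNKNOWN") (fun n => pvTypeVal.getD n ("UNKNOWN", "UNKNOWN")) _ hp]
  rw [List.head?_map]
  simp only [pvTypePri, pv_head?_filter_cons, List.filter_nil]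
  clear hp
  by_cases h1 : PySem.Str.isIn "STARLINK" u = true
  · simp only [h1, Bool.true_or, reduceIte]
    rfl
  rw [Bool.not_eq_true] at h1
  simp only [h1, Bool.false_or]
  by_cases h2 : PySem.Str.isIn "ONEWEB" u = true
  · simp only [h2, Bool.true_or, reduceIte]
    rfl
  rw [Bool.not_eq_true] at h2
  simp only [h2, Bool.false_or]
  by_cases h3 : PySem.Str.isIn "IRIDIUM" u = true
  · simp only [h3, reduceIte]
    rfl
  rw [Bool.not_eq_true] at h3
  simp only [h3]
  by_cases h4 : PySem.Str.isIn "GPS" u = true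
  · simp only [h4, Bool.true_or, reduceIte]
    rfl
  rw [Bool.not_eq_true] at h4
  simp only [h4, Bool.false_or]
  by_cases h5 : PySem.Str.isIn "GLONASS" u = true
  · simp only [h5, Bool.true_or, reduceIte]
    rfl
  rw [Bool.not_eq_true] at h5
  simp only [h5, Bool.false_or]
  by_cases h6 : PySem.Str.isIn "GALILEO" u = true
  · simp only [h6, Bool.true_or, reduceIte]
    rfl
  rw [Bool.not_eq_true] at h6
  simp only [h6, Bool.false_or]
  by_cases h7 : PySem.Str.isIn "BEIDOU" u = true
  · simp only [h7, reduceIte]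
    rfl
  rw [Bool.not_eq_true] at h7
  simp only [h7]
  by_cases h8 : PySem.Str.isIn "NOAA" u = true
  · simp only [h8, Bool.true_or, reduceIte]
    rfl
  rw [Bool.not_eq_true] at h8
  simp only [h8, Bool.false_or]
  by_cases h9 : PySem.Str.isIn "GOES" u = true
  · simp only [h9, Bool.true_or, reduceIte]
    rfl
  rw [Bool.not_eq_true] at h9
  simp only [h9, Bool.false_or]
  by_cases h10 : PySem.Str.isIn "METOP" u = true
  · simp only [h10, reduceIte]
    rfl
  rw [Bool.not_eq_true] at h10
  simp only [h10]
  by_cases h11 : PySem.Str.isIn "LANDSAT" u = true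
  · simp only [h11, Bool.true_or, reduceIte]
    rfl
  rw [Bool.not_eq_true] at h11
  simp only [h11, Bool.false_or]
  by_cases h12 : PySem.Str.isIn "SENTINEL" u = true
  · simp only [h12, Bool.true_or, reduceIte]
    rfl
  rw [Bool.not_eq_true] at h12
  simp only [h12, Bool.false_or]
  by_cases h13 : PySem.Str.isIn "WORLDVIEW" u = true
  · simp only [h13, reduceIte]
    rfl
  rw [Bool.not_eq_true] at h13
  simp only [h13]
  by_cases h14 : PySem.Str.isIn "ISS" u = true
  · simp only [h14, reduceIte]
    rfl
  rw [Bool.not_eq_true] at h14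
  simp only [h14]
  by_cases h15 : PySem.Str.isIn "COSMOS" u = true
  · simp only [h15, reduceIte]
    rfl
  rw [Bool.not_eq_true] at h15
  simp only [h15]
  rfl

-- A's country if/elif chain over the defaults dict = one literal dict whose "inferred_country" value is the matching if-expression
theorem pv_country_dict (c1 c2 c3 c4 c5 : Bool) :
    (if c1 then
        (PySem.Dict.ofList [("inferred_country", "UNKNOWN"), ("inferred_type", "UNKNOWN"), ("inferred_purpose", "UNKNOWN")]).insert "inferred_country" "INTERNATIONAL"
      else if c2 then
        (PySem.Dict.ofList [("inferred_country", "UNKNOWN"), ("inferred_type", "UNKNOWN"), ("inferred_purpose", "UNKNOWN")]).insert "inferred_country" "US"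
      else if c3 then
        (PySem.Dict.ofList [("inferred_country", "UNKNOWN"), ("inferred_type", "UNKNOWN"), ("inferred_purpose", "UNKNOWN")]).insert "inferred_country" "RU"
      else if c4 then
        (PySem.Dict.ofList [("inferred_country", "UNKNOWN"), ("inferred_type", "UNKNOWN"), ("inferred_purpose", "UNKNOWN")]).insert "inferred_country" "CN"
      else if c5 then
        (PySem.Dict.ofList [("inferred_country", "UNKNOWN"), ("inferred_type", "UNKNOWN"), ("inferred_purpose", "UNKNOWN")]).insert "inferred_country" "EU"
      else PySem.Dict.ofList [("inferred_country", "UNKNOWN"), ("inferred_type", "UNKNOWN"), ("inferred_purpose", "UNKNOWN")])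
    = PySem.Dict.ofList [("inferred_country",
        if c1 then "INTERNATIONAL" else if c2 then "US" else if c3 then "RU" else if c4 then "CN" else if c5 then "EU" else "UNKNOWN"),
        ("inferred_type", "UNKNOWN"), ("inferred_purpose", "UNKNOWN")] := by
  cases c1 <;> cases c2 <;> cases c3 <;> cases c4 <;> cases c5 <;> rfl

-- A's type/purpose if/elif chain over a dict with an arbitrary country value: its items
theorem pv_type_items (c : String) (t1 t2 t3 t4 t5 t6 : Bool) :
    (if t1 then
        ((PySem.Dict.ofList [("inferred_country", c), ("inferred_type", "UNKNOWN"), ("inferred_purpose", "UNKNOWN")]).insert "inferred_type" "COMMUNICATION").insert "inferred_purpose" "Internet/Communications constellation"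
      else if t2 then
        ((PySem.Dict.ofList [("inferred_country", c), ("inferred_type", "UNKNOWN"), ("inferred_purpose", "UNKNOWN")]).insert "inferred_type" "NAVIGATION").insert "inferred_purpose" "Global Navigation Satellite System"
      else if t3 then
        ((PySem.Dict.ofList [("inferred_country", c), ("inferred_type", "UNKNOWN"), ("inferred_purpose", "UNKNOWN")]).insert "inferred_type" "WEATHER").insert "inferred_purpose" "Weather monitoring and forecasting"
      else if t4 then
        ((PySem.Dict.ofList [("inferred_country", c), ("inferred_type", "UNKNOWN"), ("inferred_purpose", "UNKNOWN")]).insert "inferred_type" "EARTH_OBSERVATION").insert "inferred_purpose" "Earth observation and remote sensing"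
      else if t5 then
        ((PySem.Dict.ofList [("inferred_country", c), ("inferred_type", "UNKNOWN"), ("inferred_purpose", "UNKNOWN")]).insert "inferred_type" "SPACE_STATION").insert "inferred_purpose" "International Space Station"
      else if t6 then
        ((PySem.Dict.ofList [("inferred_country", c), ("inferred_type", "UNKNOWN"), ("inferred_purpose", "UNKNOWN")]).insert "inferred_type" "MILITARY").insert "inferred_purpose" "Military/Intelligence satellite"
      else PySem.Dict.ofList [("inferred_country", c), ("inferred_type", "UNKNOWN"), ("inferred_purpose", "UNKNOWN")]).items
    = [("inferred_country", c),
       ("inferred_type",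
         (if t1 then ("COMMUNICATION", "Internet/Communications constellation")
          else if t2 then ("NAVIGATION", "Global Navigation Satellite System")
          else if t3 then ("WEATHER", "Weather monitoring and forecasting")
          else if t4 then ("EARTH_OBSERVATION", "Earth observation and remote sensing")
          else if t5 then ("SPACE_STATION", "International Space Station")
          else if t6 then ("MILITARY", "Military/Intelligence satellite")
          else ("UNKNOWN", "UNKNOWN")).1),
       ("inferred_purpose",
         (if t1 then ("COMMUNICATION", "Internet/Communications constellation")
          else if t2 then ("NAVIGATION", "Global Navigation Satellite System")
          else if t3 then ("WEATHER", "Weather monitoring and forecasting")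
          else if t4 then ("EARTH_OBSERVATION", "Earth observation and remote sensing")
          else if t5 then ("SPACE_STATION", "International Space Station")
          else if t6 then ("MILITARY", "Military/Intelligence satellite")
          else ("UNKNOWN", "UNKNOWN")).2)] := by
  cases t1 <;> cases t2 <;> cases t3 <;> cases t4 <;> cases t5 <;> cases t6 <;> rfl

-- ===== VERDICT =====
set_option maxHeartbeats 1000000 in
theorem infer_satellite_info_py_spec : Claim_equal_infer_satellite_info_py := by
  intro s _
  unfold Spec_infer_satellite_info_py infer_satellite_info_py infer_satellite_info_py_alt
  simp only [List.any_cons, List.any_nil, Bool.or_false]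
  generalize PySem.Str.upper s = u
  rw [pv_country_sel u, pv_type_sel u, pv_country_dict, pv_type_items]
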